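-- pv_equiv track=rewrite | github.com/yjhkdjsg/Minor-Project | nlp_refiner.py | smart_collapse_chars
-- ===== SOURCE A (Python) =====
-- def smart_collapse_chars(text: str, dedupe_threshold: int = 3) -> str:
--     """
--     Intelligently collapse character streams while handling duplicates.
--
--     Rules:
--     - Single letters are joined into words
--     - Consecutive identical letters (e.g., "s s s") are reduced to single letter
--     - Multi-char tokens are preserved
--     - Threshold determines when to deduplicate (default: 3+ consecutive)
--     """
--     if not text or not text.strip():
--         return ""
--
--     tokens = text.strip().split()
--     if not tokens:
--         return ""
--
--     words = []
--     current_word = []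
--     last_char = None
--     char_count = 0
--
--     for token in tokens:
--         token = token.strip()
--         if not token:
--             continue
--
--         # Multi-character token
--         if len(token) > 1:
--             # Flush current word
--             if current_word:
--                 words.append(''.join(current_word))
--                 current_word = []
--                 last_char = None
--                 char_count = 0
--             words.append(token)
--
--         # Single character
--         elif len(token) == 1 and token.isalpha():
--             # Check for repetition
--             if token.lower() == last_char:
--                 char_count += 1
--                 # Only add if below threshold (deduplicate excessive repeats)
--                 if char_count < dedupe_threshold:
--                     current_word.append(token)
--             else:
--                 current_word.append(token)
--                 last_char = token.lower()
--                 char_count = 1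
--
--         # Non-alpha single char (punctuation, etc.)
--         else:
--             if current_word:
--                 words.append(''.join(current_word))
--                 current_word = []
--                 last_char = None
--                 char_count = 0
--             words.append(token)
--
--     # Flush remaining
--     if current_word:
--         words.append(''.join(current_word))
--
--     return ' '.join(words)
-- ===== SOURCE B (Python) =====
-- def smart_collapse_chars(text: str, dedupe_threshold: int = 3) -> str:
--     """Two-phase rewrite: group tokens into maximal runs of single letters vs
--     other tokens, then render each letter group by squashing consecutive
--     case-insensitive repeats (keeping the first max(1, threshold-1) of a run)."""
--     keep = max(1, dedupe_threshold - 1)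
--     groups = []  # list of (is_letter_group, tokens)
--     for t in text.strip().split():
--         if _is_letter(t) and groups and groups[-1][0]:
--             groups[-1] = (True, groups[-1][1] + [t])
--         else:
--             groups.append((_is_letter(t), [t]))
--     words = []
--     for is_l, g in groups:
--         if is_l:
--             words.append(_squash(g, keep))
--         else:
--             words.extend(g)
--     return ' '.join(words)
--
--
-- def _is_letter(t):
--     return len(t) == 1 and t.isalpha()
--
--
-- def _squash(g, keep):
--     out = []
--     prev = None
--     run = 0
--     for ch in g:
--         run = run + 1 if ch.lower() == prev else 1
--         prev = ch.lower()
--         if run <= keep: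
--             out.append(ch)
--     return ''.join(out)
-- ===== Notes on version B (the rewrite author's own statement) =====
-- stated objective: alternative
-- what changed: Replaces A's streaming state machine (word buffer + last_char + char_count with explicit flushes) by a two-phase groupby-style pass: first group tokens into maximal runs of single letters vs other tokens, then render each letter group by a separate run-squashing fold keeping the first max(1, threshold-1) of each case-insensitive run.
import Mathlib
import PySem

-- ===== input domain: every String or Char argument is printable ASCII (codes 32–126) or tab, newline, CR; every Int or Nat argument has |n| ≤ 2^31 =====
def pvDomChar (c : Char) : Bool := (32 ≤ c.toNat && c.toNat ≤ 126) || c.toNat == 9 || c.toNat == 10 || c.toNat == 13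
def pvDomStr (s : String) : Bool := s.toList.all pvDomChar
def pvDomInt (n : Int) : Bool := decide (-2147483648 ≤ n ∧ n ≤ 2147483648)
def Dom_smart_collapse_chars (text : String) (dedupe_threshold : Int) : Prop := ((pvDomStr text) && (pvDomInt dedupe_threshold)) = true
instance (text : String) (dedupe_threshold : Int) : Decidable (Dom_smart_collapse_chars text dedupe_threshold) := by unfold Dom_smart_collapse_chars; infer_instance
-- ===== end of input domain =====

-- B replaces A's streaming state machine by a two-phase groupby-style pass
-- (group tokens into letter-runs vs other tokens, then squash each run);
-- objective: alternative decomposition, same asymptotic cost.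


-- ===== PORT A =====
-- one loop iteration of A: state = (words, current_word, last_char, char_count)
def sccA_step (dedupe_threshold : Int)
    (st : List String × List String × Option String × Int) (token0 : String) :
    List String × List String × Option String × Int :=
  let token := PySem.Str.strip token0
  if token = "" then st
  else
    let words := st.1
    let cur := st.2.1
    let last := st.2.2.1
    let cnt := st.2.2.2
    if 1 < PySem.Str.len token then
      if cur ≠ [] then (words ++ [PySem.Str.join "" cur] ++ [token], [], none, 0)
      else (words ++ [token], cur, last, cnt)
    else if PySem.Str.len token = 1 ∧ PySem.Str.strIsalpha token = true then
      if some (PySem.Str.lower token) = last then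
        if cnt + 1 < dedupe_threshold then (words, cur ++ [token], last, cnt + 1)
        else (words, cur, last, cnt + 1)
      else (words, cur ++ [token], some (PySem.Str.lower token), 1)
    else
      if cur ≠ [] then (words ++ [PySem.Str.join "" cur] ++ [token], [], none, 0)
      else (words ++ [token], cur, last, cnt)

def smart_collapse_chars (text : String) (dedupe_threshold : Int) : String :=
  if text = "" ∨ PySem.Str.strip text = "" then ""
  else
    let tokens := PySem.Str.split₀ (PySem.Str.strip text)
    if tokens = [] then ""
    else
      let st := tokens.foldl (sccA_step dedupe_threshold) ([], [], none, 0)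
      let words := if st.2.1 ≠ [] then st.1 ++ [PySem.Str.join "" st.2.1] else st.1
      PySem.Str.join " " words

-- ===== PORT B =====
def sccB_isLetter (t : String) : Bool := PySem.Str.len t == 1 && PySem.Str.strIsalpha t

-- phase 1 step: add a token to the grouped structure (list of (is_letter_group, tokens))
def sccB_addTok (groups : List (Bool × List String)) (t : String) : List (Bool × List String) :=
  match groups.getLast? with
  | some p =>
      if sccB_isLetter t && p.1 then groups.dropLast ++ [(true, p.2 ++ [t])]
      else groups ++ [(sccB_isLetter t, [t])]
  | none => groups ++ [(sccB_isLetter t, [t])]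

-- squash loop step: state = (out, prev, run)
def sccB_squashStep (keep : Int)
    (s : List String × Option String × Int) (ch : String) :
    List String × Option String × Int :=
  let run := if some (PySem.Str.lower ch) = s.2.1 then s.2.2 + 1 else 1
  let out := if run ≤ keep then s.1 ++ [ch] else s.1
  (out, some (PySem.Str.lower ch), run)

def sccB_squash (g : List String) (keep : Int) : String :=
  PySem.Str.join "" (g.foldl (sccB_squashStep keep) ([], none, 0)).1

def smart_collapse_chars_alt (text : String) (dedupe_threshold : Int) : String :=
  let keep := max 1 (dedupe_threshold - 1)
  let groups := (PySem.Str.split₀ (PySem.Str.strip text)).foldl sccB_addTok []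
  let words := groups.foldl
    (fun ws (p : Bool × List String) =>
      if p.1 then ws ++ [sccB_squash p.2 keep] else ws ++ p.2) ([] : List String)
  PySem.Str.join " " words

-- ===== PRECONDITION & SPEC =====
def Spec_smart_collapse_chars (text : String) (dedupe_threshold : Int) (out : String) : Prop := out = smart_collapse_chars_alt text dedupe_threshold
instance (text : String) (dedupe_threshold : Int) (out : String) : Decidable (Spec_smart_collapse_chars text dedupe_threshold out) := by unfold Spec_smart_collapse_chars; infer_instance

-- ===== CLAIM (what is proved, stated in full; the proofs are below) =====
def Claim_equal_smart_collapse_chars : Prop := ∀ (text : String) (dedupe_threshold : Int), Dom_smart_collapse_chars text dedupe_threshold → Spec_smart_collapse_chars text dedupe_threshold (smart_collapse_chars text dedupe_threshold)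

-- ===== LEMMAS AND PROOFS =====

-- a token produced by str.split(): nonempty and whitespace-free
def pvGood (t : String) : Prop := t ≠ "" ∧ PySem.Str.strip t = t

-- A's letter-branch step on the open-word state (cur, last, cnt)
def pvStepL (thr : Int) (st : List String × Option String × Int) (t : String) :
    List String × Option String × Int :=
  if some (PySem.Str.lower t) = st.2.1 then
    if st.2.2 + 1 < thr then (st.1 ++ [t], st.2.1, st.2.2 + 1)
    else (st.1, st.2.1, st.2.2 + 1)
  else (st.1 ++ [t], some (PySem.Str.lower t), 1)

def pvFlush (st : List String × Option String × Int) : List String :=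
  if st.1 ≠ [] then [PySem.Str.join "" st.1] else []

-- the words A will still emit, as a recursion over the remaining tokens
def pvFA (thr : Int) (st : List String × Option String × Int) : List String → List String
  | [] => pvFlush st
  | t :: ts =>
      if sccB_isLetter t then pvFA thr (pvStepL thr st t) ts
      else pvFlush st ++ t :: pvFA thr ([], none, 0) ts

-- the words B will still emit, given the optionally open letter group
def pvGBs (keep : Int) : Option (List String) → List String → List String
  | none, [] => []
  | some g, [] => [sccB_squash g keep]
  | none, t :: ts =>
      if sccB_isLetter t then pvGBs keep (some [t]) ts else t :: pvGBs keep none ts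
  | some g, t :: ts =>
      if sccB_isLetter t then pvGBs keep (some (g ++ [t])) ts
      else sccB_squash g keep :: t :: pvGBs keep none ts

def pvRender (keep : Int) (gs : List (Bool × List String)) : List String :=
  gs.flatMap (fun p => if p.1 then [sccB_squash p.2 keep] else p.2)

def pvFinal (r : List String × List String × Option String × Int) : List String :=
  if r.2.1 ≠ [] then r.1 ++ [PySem.Str.join "" r.2.1] else r.1

def pvSquashState (keep : Int) (g : List String) : List String × Option String × Int :=
  g.foldl (sccB_squashStep keep) ([], none, 0)

def pvGroupsOf (gs : List (Bool × List String)) : Option (List String) → List (Bool × List String)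
  | none => gs
  | some g => gs ++ [(true, g)]

-- tokens of split() are nonempty and whitespace-free (chars level)
theorem pv_dropWhile_self (l : List Char) (h : ∀ c ∈ l, PySem.Chars.isspace c = false) :
    l.dropWhile PySem.Chars.isspace = l := by
  cases l with
  | nil => rfl
  | cons c l => rw [List.dropWhile_cons, if_neg (by simp [h c (by simp)])]

theorem pv_split_go_good (l : List Char) (cur : List Char) (acc : List (List Char))
    (hacc : ∀ u ∈ acc, u ≠ [] ∧ ∀ c ∈ u, PySem.Chars.isspace c = false)
    (hcur : ∀ c ∈ cur, PySem.Chars.isspace c = false) :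
    ∀ u ∈ PySem.Chars.split₀.go l cur acc, u ≠ [] ∧ ∀ c ∈ u, PySem.Chars.isspace c = false := by
  induction l generalizing cur acc with
  | nil =>
      intro u hu
      by_cases hc : cur = []
      · subst hc
        simp [PySem.Chars.split₀.go] at hu
        exact hacc u hu
      · have hce : cur.isEmpty = false := by simpa using hc
        simp only [PySem.Chars.split₀.go, hce, Bool.false_eq_true, if_false,
          List.mem_reverse, List.mem_cons] at hu
        rcases hu with h | h
        · subst h
          exact ⟨by simpa using hc, fun c hcm => hcur c (by simpa using hcm)⟩
        · exact hacc u h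
  | cons c rest ih =>
      intro u hu
      by_cases hsp : PySem.Chars.isspace c = true
      · by_cases hc : cur = []
        · subst hc
          simp only [PySem.Chars.split₀.go, hsp, if_true] at hu
          simp only [List.isEmpty_nil, if_true] at hu
          exact ih [] acc hacc (by simp) u hu
        · have hce : cur.isEmpty = false := by simpa using hc
          simp only [PySem.Chars.split₀.go, hsp, if_true, hce, Bool.false_eq_true, if_false] at hu
          refine ih [] (cur.reverse :: acc) ?_ (by simp) u hu
          intro v hv
          rcases List.mem_cons.mp hv with h | h
          · subst h
            exact ⟨by simpa using hc, fun d hd => hcur d (by simpa using hd)⟩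
          · exact hacc v h
      · simp only [PySem.Chars.split₀.go, if_neg hsp] at hu
        exact ih (c :: cur) acc hacc
          (fun d hd => by rcases List.mem_cons.mp hd with h | h
                          · subst h; simpa using hsp
                          · exact hcur d h) u hu

theorem pv_split_good (s t : String) (ht : t ∈ PySem.Str.split₀ s) : pvGood t := by
  have hmem : t.toList ∈ PySem.Chars.split₀ s.toList := by
    rw [← PySem.Str.split₀_map_toList]
    exact List.mem_map_of_mem ht
  obtain ⟨hne, hns⟩ := pv_split_go_good s.toList [] [] (by simp) (by simp) t.toList hmem
  have htne : t ≠ "" := by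
    intro h0
    exact hne (by simp [h0])
  refine ⟨htne, ?_⟩
  have hlist : (PySem.Str.strip t).toList = t.toList := by
    rw [PySem.Str.toList_strip]
    unfold PySem.Chars.strip PySem.Chars.lstrip PySem.Chars.rstrip
    rw [pv_dropWhile_self _ hns, pv_dropWhile_self _ (fun c hc => hns c (by simpa using hc)),
      List.reverse_reverse]
  exact String.toList_inj.mp hlist

theorem pv_renderFold (keep : Int) (gs : List (Bool × List String)) (a : List String) :
    gs.foldl (fun ws p => if p.1 then ws ++ [sccB_squash p.2 keep] else ws ++ p.2) a
      = a ++ pvRender keep gs := by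
  induction gs generalizing a with
  | nil => simp [pvRender]
  | cons p gs ih =>
      simp only [List.foldl_cons, ih, pvRender, List.flatMap_cons]
      by_cases h : p.1 = true <;> simp [h]

-- LA: A's fold, finalized, emits ws ++ pvFA st tokens
theorem pv_LA (thr : Int) (ts : List String) (ws cur : List String)
    (last : Option String) (cnt : Int)
    (hg : ∀ t ∈ ts, pvGood t) (hinv : cur = [] → last = none ∧ cnt = 0) :
    pvFinal (ts.foldl (sccA_step thr) (ws, cur, last, cnt))
      = ws ++ pvFA thr (cur, last, cnt) ts := by
  induction ts generalizing ws cur last cnt with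
  | nil =>
      simp only [List.foldl_nil, pvFA, pvFinal, pvFlush]
      split <;> simp
  | cons t ts ih =>
      obtain ⟨hne, hstrip⟩ := hg t (by simp)
      have hgs : ∀ u ∈ ts, pvGood u := fun u hu => hg u (List.mem_cons_of_mem _ hu)
      simp only [List.foldl_cons, sccA_step, hstrip, if_neg hne]
      by_cases hL : sccB_isLetter t = true
      · have hlen : PySem.Str.len t = 1 ∧ PySem.Str.strIsalpha t = true := by
          simpa [sccB_isLetter] using hL
        rw [if_neg (by omega), if_pos hlen]
        simp only [pvFA, hL, if_true]
        simp only [pvStepL]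
        split_ifs with h1 h2
        · exact ih _ _ _ _ hgs (by simp)
        · refine ih _ _ _ _ hgs ?_
          intro hc
          exact absurd ((hinv hc).1 ▸ h1) (by simp)
        · exact ih _ _ _ _ hgs (by simp)
      · have hcond : ¬(PySem.Str.len t = 1 ∧ PySem.Str.strIsalpha t = true) := by
          simpa [sccB_isLetter] using hL
        simp only [pvFA, hL, if_false, Bool.false_eq_true]
        split_ifs with h1 h2 h2
        · rw [ih _ _ _ _ hgs (by simp)]
          simp [pvFlush, h2]
        · have hc := not_not.mp h2
          rw [(hinv hc).1, (hinv hc).2, ih _ _ _ _ hgs (by simp)]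
          simp [pvFlush, hc]
        · rw [ih _ _ _ _ hgs (by simp)]
          simp [pvFlush, h2]
        · have hc := not_not.mp h2
          rw [(hinv hc).1, (hinv hc).2, ih _ _ _ _ hgs (by simp)]
          simp [pvFlush, hc]

-- squash-state invariants
theorem pv_squash_out_ne_aux (keep : Int) (g : List String)
    (st : List String × Option String × Int) (h : st.1 ≠ []) :
    (g.foldl (sccB_squashStep keep) st).1 ≠ [] := by
  induction g generalizing st with
  | nil => exact h
  | cons ch g ih =>
      simp only [List.foldl_cons]
      apply ih
      simp only [sccB_squashStep]
      split <;> split <;> simp [h]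

theorem pv_squash_out_ne (keep : Int) (hk : 1 ≤ keep) (g : List String) (hne : g ≠ []) :
    (pvSquashState keep g).1 ≠ [] := by
  match g with
  | [] => exact absurd rfl hne
  | ch :: g =>
      unfold pvSquashState
      simp only [List.foldl_cons]
      apply pv_squash_out_ne_aux
      simp [sccB_squashStep, hk]

theorem pv_squash_inv_aux (keep : Int) (g : List String)
    (st : List String × Option String × Int) (h : st.2.1 ≠ none → 1 ≤ st.2.2) :
    (g.foldl (sccB_squashStep keep) st).2.1 ≠ none → 1 ≤ (g.foldl (sccB_squashStep keep) st).2.2 := by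
  induction g generalizing st with
  | nil => exact h
  | cons ch g ih =>
      simp only [List.foldl_cons]
      apply ih
      intro _
      simp only [sccB_squashStep]
      split
      · rename_i hm
        have : st.2.1 ≠ none := by rw [← hm]; simp
        have := h this
        omega
      · omega

theorem pv_squash_inv (keep : Int) (g : List String) :
    (pvSquashState keep g).2.1 ≠ none → 1 ≤ (pvSquashState keep g).2.2 := by
  exact pv_squash_inv_aux keep g ([], none, 0) (by simp)

-- per-step agreement of A's letter branch with B's squash step
theorem pv_stepL_eq (thr : Int) (st : List String × Option String × Int) (t : String)
    (hinv : st.2.1 ≠ none → 1 ≤ st.2.2) :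
    pvStepL thr st t = sccB_squashStep (max 1 (thr - 1)) st t := by
  simp only [pvStepL, sccB_squashStep]
  by_cases hm : some (PySem.Str.lower t) = st.2.1
  · have hne : st.2.1 ≠ none := by rw [← hm]; simp
    have h1 := hinv hne
    rw [if_pos hm, if_pos hm, hm]
    by_cases hc : st.2.2 + 1 < thr
    · rw [if_pos hc, if_pos (show st.2.2 + 1 ≤ max 1 (thr - 1) by omega)]
    · rw [if_neg hc, if_neg (show ¬ st.2.2 + 1 ≤ max 1 (thr - 1) by omega)]
  · rw [if_neg hm, if_neg hm, if_pos (show (1:Int) ≤ max 1 (thr - 1) by omega)]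

-- FA = GBs
theorem pv_FA_GBs (thr : Int) (ts : List String) :
    (pvFA thr ([], none, 0) ts = pvGBs (max 1 (thr - 1)) none ts) ∧
    (∀ g, g ≠ [] → pvFA thr (pvSquashState (max 1 (thr - 1)) g) ts
        = pvGBs (max 1 (thr - 1)) (some g) ts) := by
  set k := max 1 (thr - 1) with hk
  have hk1 : 1 ≤ k := by omega
  induction ts with
  | nil =>
      refine ⟨by simp [pvFA, pvGBs, pvFlush], ?_⟩
      intro g hg
      have hout := pv_squash_out_ne k hk1 g hg
      simp only [pvFA, pvFlush, if_pos hout, pvGBs]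
      rfl
  | cons t ts ih =>
      constructor
      · by_cases hL : sccB_isLetter t = true
        · have e1 : pvStepL thr ([], none, 0) t = pvSquashState k [t] := by
            rw [pv_stepL_eq thr ([], none, 0) t (by simp)]; rfl
          simp only [pvFA, pvGBs, hL, if_true, e1]
          exact ih.2 [t] (by simp)
        · simp only [pvFA, pvGBs, hL, if_false, Bool.false_eq_true]
          simp only [pvFlush, if_neg (by simp : ¬(([] : List String) ≠ []))]
          rw [ih.1]; simp
      · intro g hg
        by_cases hL : sccB_isLetter t = true
        · have e1 : pvStepL thr (pvSquashState k g) t = pvSquashState k (g ++ [t]) := by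
            rw [pv_stepL_eq thr _ t (pv_squash_inv k g), ← hk]
            simp [pvSquashState, List.foldl_append]
          simp only [pvFA, pvGBs, hL, if_true, e1]
          exact ih.2 (g ++ [t]) (by simp)
        · have hout := pv_squash_out_ne k hk1 g hg
          simp only [pvFA, pvGBs, hL, if_false, Bool.false_eq_true]
          simp only [pvFlush, if_pos hout]
          rw [ih.1]
          simp [sccB_squash, pvSquashState]

theorem pv_shape_some (gs : List (Bool × List String)) (g : List String) (h : g ≠ []) :
    (some g = none → gs = [] ∨ ∃ p, gs.getLast? = some p ∧ p.1 = false) ∧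
    (∀ g', some g = some g' → g' ≠ []) :=
  ⟨by simp, by intro g' e; injection e with e; exact e ▸ h⟩

theorem pv_shape_none (gs : List (Bool × List String))
    (h : gs = [] ∨ ∃ p, gs.getLast? = some p ∧ p.1 = false) :
    ((none : Option (List String)) = none → gs = [] ∨ ∃ p, gs.getLast? = some p ∧ p.1 = false) ∧
    (∀ g', (none : Option (List String)) = some g' → g' ≠ []) :=
  ⟨fun _ => h, by simp⟩

-- LB: B's grouping fold renders to pvGBs
theorem pv_LB (keep : Int) (ts : List String) (gs : List (Bool × List String))
    (og : Option (List String))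
    (hshape : (og = none → gs = [] ∨ ∃ p, gs.getLast? = some p ∧ p.1 = false) ∧
              (∀ g, og = some g → g ≠ [])) :
    pvRender keep (ts.foldl sccB_addTok (pvGroupsOf gs og))
      = pvRender keep gs ++ pvGBs keep og ts := by
  induction ts generalizing gs og with
  | nil =>
      cases og with
      | none => simp [pvGBs, pvGroupsOf]
      | some g => simp [pvRender, pvGBs, pvGroupsOf]
  | cons t ts ih =>
      have hL' : sccB_isLetter t = true ∨ sccB_isLetter t = false := by
        cases sccB_isLetter t <;> simp
      cases og with
      | some g =>
          simp only [pvGroupsOf, List.foldl_cons, sccB_addTok, List.getLast?_concat]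
          by_cases hL : sccB_isLetter t = true
          · rw [if_pos (by simp [hL]), List.dropLast_concat]
            rw [show (gs ++ [(true, g ++ [t])] : List (Bool × List String)) = pvGroupsOf gs (some (g ++ [t])) from rfl,
              ih gs (some (g ++ [t])) (pv_shape_some gs (g ++ [t]) (by simp))]
            simp [pvGBs, hL]
          · have hLf : sccB_isLetter t = false := by simpa using hL
            rw [if_neg (by simp [hLf])]
            have : gs ++ [(true, g)] ++ [(sccB_isLetter t, [t])]
                = (gs ++ [(true, g), (sccB_isLetter t, [t])]) := by simp
            rw [this, show (gs ++ [(true, g), (sccB_isLetter t, [t])] : List (Bool × List String)) = pvGroupsOf (gs ++ [(true, g), (sccB_isLetter t, [t])]) none from rfl,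
              ih (gs ++ [(true, g), (sccB_isLetter t, [t])]) none
              (pv_shape_none _ (Or.inr ⟨(sccB_isLetter t, [t]), by simp, hLf⟩))]
            simp [pvRender, pvGBs, hLf]
      | none =>
          have hadd : sccB_addTok gs t = gs ++ [(sccB_isLetter t, [t])] := by
            rcases hshape.1 rfl with h | ⟨p, hp, hpf⟩
            · subst h; rfl
            · simp [sccB_addTok, hp, hpf]
          simp only [pvGroupsOf, List.foldl_cons, hadd]
          by_cases hL : sccB_isLetter t = true
          · rw [hL]
            rw [show (gs ++ [(true, [t])] : List (Bool × List String)) = pvGroupsOf gs (some [t]) from rfl,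
              ih gs (some [t]) (pv_shape_some gs [t] (by simp))]
            simp [pvGBs, hL]
          · have hLf : sccB_isLetter t = false := by simpa using hL
            rw [hLf]
            rw [show (gs ++ [(false, [t])] : List (Bool × List String)) = pvGroupsOf (gs ++ [(false, [t])]) none from rfl,
              ih (gs ++ [(false, [t])]) none
              (pv_shape_none _ (Or.inr ⟨(false, [t]), by simp, rfl⟩))]
            simp [pvRender, pvGBs, hLf]

-- ===== VERDICT (by name: the statement is the Claim_ definition above) =====
theorem smart_collapse_chars_spec : Claim_equal_smart_collapse_chars := by
  intro text thr _
  unfold Spec_smart_collapse_chars smart_collapse_chars smart_collapse_chars_alt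
  by_cases h0 : text = "" ∨ PySem.Str.strip text = ""
  · rw [if_pos h0]
    have hs : PySem.Str.strip text = "" := by
      rcases h0 with h | h
      · subst h; rfl
      · exact h
    rw [hs]
    rfl
  · rw [if_neg h0]
    by_cases ht : PySem.Str.split₀ (PySem.Str.strip text) = []
    · rw [if_pos ht, ht]
      rfl
    · rw [if_neg ht]
      have hgood : ∀ t ∈ PySem.Str.split₀ (PySem.Str.strip text), pvGood t :=
        fun t h => pv_split_good _ t h
      show PySem.Str.join " "
          (pvFinal ((PySem.Str.split₀ (PySem.Str.strip text)).foldl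
            (sccA_step thr) ([], [], none, 0))) = _
      rw [pv_LA thr _ [] [] none 0 hgood (fun _ => ⟨rfl, rfl⟩)]
      show _ = PySem.Str.join " "
          (((PySem.Str.split₀ (PySem.Str.strip text)).foldl sccB_addTok (pvGroupsOf [] none)).foldl
            (fun ws p => if p.1 then ws ++ [sccB_squash p.2 (max 1 (thr - 1))] else ws ++ p.2) [])
      rw [pv_renderFold (max 1 (thr - 1)) _ []]
      rw [pv_LB (max 1 (thr - 1)) _ [] none (pv_shape_none [] (Or.inl rfl))]
      rw [(pv_FA_GBs thr _).1]
      simp [pvRender]
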